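-- pv_equiv track=rewrite | github.com/pypi-data/pypi-mirror-105 | packages/draw-hypertrie/draw_hypertrie-0.1.3-py3-none-any.whl/hypertrie/hypertrie_commons.py | next_slice_key
-- ===== SOURCE A (Python) =====
-- from typing import Tuple, Optional
--
-- HTKeyPart = int
--
-- SliceKey = Tuple[Optional[HTKeyPart], ...]
--
-- def next_slice_key(old_slice_key: SliceKey, pos: int, key_part: HTKeyPart) -> SliceKey:
--     tmp_key = list(old_slice_key)
--     no_slices = tmp_key.count(None)
--     curr_pos = 0
--     for i in range(len(tmp_key)):
--         if tmp_key[i] is None: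
--             if pos == curr_pos:
--                 tmp_key[i] = key_part
--                 break
--             else:
--                 curr_pos += 1
--     return tuple(tmp_key)
-- ===== SOURCE B (Python) =====
-- def next_slice_key(old_slice_key, pos, key_part):
--     none_indices = [i for i, v in enumerate(old_slice_key) if v is None]
--     tmp = list(old_slice_key)
--     if 0 <= pos < len(none_indices):
--         tmp[none_indices[pos]] = key_part
--     return tuple(tmp)
-- ===== Notes on version B (the rewrite author's own statement) =====
-- stated objective: simpler
-- what changed: A's single interleaved scan with a running None-counter and break is replaced by first building the list of all None positions, then doing one guarded indexed write at none_indices[pos] (unchanged if pos is out of that range).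
import Mathlib
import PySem

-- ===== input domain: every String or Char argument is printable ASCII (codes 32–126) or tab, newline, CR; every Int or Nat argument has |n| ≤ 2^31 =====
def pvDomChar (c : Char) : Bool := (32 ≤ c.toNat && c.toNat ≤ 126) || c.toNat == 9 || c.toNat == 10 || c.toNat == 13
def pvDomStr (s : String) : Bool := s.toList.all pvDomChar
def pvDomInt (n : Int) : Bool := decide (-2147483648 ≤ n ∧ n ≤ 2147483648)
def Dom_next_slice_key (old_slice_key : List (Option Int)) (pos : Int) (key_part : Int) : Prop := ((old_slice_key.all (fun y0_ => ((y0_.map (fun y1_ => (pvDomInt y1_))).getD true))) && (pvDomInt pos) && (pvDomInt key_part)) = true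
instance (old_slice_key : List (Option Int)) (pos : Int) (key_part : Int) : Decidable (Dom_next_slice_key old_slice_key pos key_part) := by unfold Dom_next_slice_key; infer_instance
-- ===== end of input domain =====

-- B replaces A's interleaved scan/count/break loop by a separate pass building the list of
-- None positions followed by one guarded indexed write (objective: simpler decomposition).

-- ===== PORT A =====
-- the loop over range(len(tmp_key)) with the curr_pos counter and break, as structural recursion
-- (A's unused 'no_slices = tmp_key.count(None)' has no effect on the result and is not mirrored)
def nskGo (key_part : Int) (pos : Int) : List (Option Int) → Int → List (Option Int)
  | [], _ => []
  | none :: xs, curr =>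
      if pos = curr then some key_part :: xs
      else none :: nskGo key_part pos xs (curr + 1)
  | some v :: xs, curr => some v :: nskGo key_part pos xs curr

def next_slice_key (old_slice_key : List (Option Int)) (pos : Int) (key_part : Int) : List (Option Int) :=
  nskGo key_part pos old_slice_key 0

-- ===== PORT B =====
-- '[i for i, v in enumerate(old_slice_key) if v is None]'
def noneIndicesFrom (xs : List (Option Int)) (s : Int) : List Int :=
  (PySem.List.enumerate xs s).filterMap (fun p => if p.2 = none then some p.1 else none)

def next_slice_key_alt (old_slice_key : List (Option Int)) (pos : Int) (key_part : Int) : List (Option Int) :=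
  let none_indices := noneIndicesFrom old_slice_key 0
  if 0 ≤ pos ∧ pos < (none_indices.length : Int) then
    -- tmp[none_indices[pos]] = key_part  (index is a nonnegative in-range position here)
    old_slice_key.set (none_indices.getD pos.toNat 0).toNat (some key_part)
  else old_slice_key

-- ===== PRECONDITION & SPEC =====
def Spec_next_slice_key (old_slice_key : List (Option Int)) (pos : Int) (key_part : Int) (out : List (Option Int)) : Prop := out = next_slice_key_alt old_slice_key pos key_part
instance (old_slice_key : List (Option Int)) (pos : Int) (key_part : Int) (out : List (Option Int)) : Decidable (Spec_next_slice_key old_slice_key pos key_part out) := by unfold Spec_next_slice_key; infer_instance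

-- ===== CLAIM (what is proved, stated in full; the proofs are below) =====
def Claim_equal_next_slice_key : Prop := ∀ (old_slice_key : List (Option Int)) (pos : Int) (key_part : Int), Dom_next_slice_key old_slice_key pos key_part → Spec_next_slice_key old_slice_key pos key_part (next_slice_key old_slice_key pos key_part)

-- ===== LEMMAS AND PROOFS =====

-- reference function: replace the p-th None (0-based), leave the list unchanged otherwise
def rep (key_part : Int) : List (Option Int) → Int → List (Option Int)
  | [], _ => []
  | none :: xs, p => if p = 0 then some key_part :: xs else none :: rep key_part xs (p - 1)
  | some v :: xs, p => some v :: rep key_part xs p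

theorem nskGo_eq_rep (kp : Int) (xs : List (Option Int)) :
    ∀ (pos curr : Int), nskGo kp pos xs curr = rep kp xs (pos - curr) := by
  induction xs with
  | nil => intro pos curr; rfl
  | cons x xs ih =>
    intro pos curr
    cases x with
    | none =>
      simp only [nskGo, rep]
      by_cases h : pos = curr
      · simp [h]
      · have h' : ¬ (pos - curr = 0) := by omega
        simp only [if_neg h, if_neg h', ih]
        have e : pos - (curr + 1) = pos - curr - 1 := by ring
        rw [e]
    | some v => simp [nskGo, rep, ih]

theorem noneIndicesFrom_shift (xs : List (Option Int)) :
    ∀ s : Int, noneIndicesFrom xs (s + 1) = (noneIndicesFrom xs s).map (· + 1) := by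
  induction xs with
  | nil => intro s; rfl
  | cons x xs ih =>
    intro s
    cases x with
    | none =>
      simp only [noneIndicesFrom, PySem.List.enumerate_cons, List.filterMap_cons] at *
      simp only [ih]
      have : s + 1 + 1 = (s + 1) + 1 := by ring
      simp [List.map_cons]
    | some v =>
      simp only [noneIndicesFrom, PySem.List.enumerate_cons, List.filterMap_cons] at *
      simp [ih]

theorem noneIndicesFrom_cons_none (xs : List (Option Int)) :
    noneIndicesFrom (none :: xs) 0 = 0 :: (noneIndicesFrom xs 0).map (· + 1) := by
  simp only [noneIndicesFrom, PySem.List.enumerate_cons, List.filterMap_cons]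
  have h := noneIndicesFrom_shift xs 0
  simp only [noneIndicesFrom] at h
  norm_num at h
  simp [h]

theorem noneIndicesFrom_cons_some (v : Int) (xs : List (Option Int)) :
    noneIndicesFrom (some v :: xs) 0 = (noneIndicesFrom xs 0).map (· + 1) := by
  simp only [noneIndicesFrom, PySem.List.enumerate_cons, List.filterMap_cons]
  have h := noneIndicesFrom_shift xs 0
  simp only [noneIndicesFrom] at h
  norm_num at h
  simp [h]

theorem noneIndicesFrom_nonneg (xs : List (Option Int)) (i : Int)
    (h : i ∈ noneIndicesFrom xs 0) : 0 ≤ i := by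
  simp only [noneIndicesFrom, List.mem_filterMap] at h
  obtain ⟨p, hp, hif⟩ := h
  rw [PySem.List.mem_enumerate_iff] at hp
  obtain ⟨k, hk, rfl⟩ := hp
  by_cases hn : (xs[k] : Option Int) = none
  · simp [hn] at hif; omega
  · simp [hn] at hif

theorem alt_eq_rep (kp : Int) (xs : List (Option Int)) :
    ∀ pos : Int, next_slice_key_alt xs pos kp = rep kp xs pos := by
  induction xs with
  | nil =>
    intro pos
    simp only [next_slice_key_alt, noneIndicesFrom, PySem.List.enumerate_nil,
      List.filterMap_nil, rep]
    simp
  | cons x xs ih =>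
    intro pos
    cases x with
    | none =>
      simp only [next_slice_key_alt, noneIndicesFrom_cons_none, rep]
      by_cases h0 : pos = 0
      · subst h0
        simp
      · have hrec := ih (pos - 1)
        simp only [next_slice_key_alt] at hrec
        by_cases hin : 0 ≤ pos ∧ pos < ((noneIndicesFrom xs 0).length : Int) + 1
        · have hpos1 : 1 ≤ pos := by omega
          have hin' : 0 ≤ pos - 1 ∧ pos - 1 < ((noneIndicesFrom xs 0).length : Int) := by omega
          have hlt : pos.toNat - 1 < (noneIndicesFrom xs 0).length := by omega
          have hmem : (noneIndicesFrom xs 0)[pos.toNat - 1] ∈ noneIndicesFrom xs 0 :=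
            List.getElem_mem _
          have hnn := noneIndicesFrom_nonneg xs _ hmem
          have hc : 0 ≤ pos ∧ pos < (((0 :: (noneIndicesFrom xs 0).map (· + 1)).length : Nat) : Int) := by
            simp; omega
          rw [if_pos hc, if_neg h0]
          rw [if_pos hin', List.getD_eq_getElem _ _ (by omega)] at hrec
          have h1n : (pos - 1).toNat = pos.toNat - 1 := by omega
          simp only [h1n] at hrec
          have hgd : (0 :: (noneIndicesFrom xs 0).map (· + 1)).getD pos.toNat 0
              = (noneIndicesFrom xs 0)[pos.toNat - 1] + 1 := by
            have hp : pos.toNat = (pos.toNat - 1) + 1 := by omega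
            conv_lhs => rw [hp]
            simp only [List.getD_cons_succ]
            rw [List.getD_eq_getElem _ _ (by simpa using hlt)]
            simp
          rw [hgd]
          have htn : ((noneIndicesFrom xs 0)[pos.toNat - 1] + 1).toNat
              = ((noneIndicesFrom xs 0)[pos.toNat - 1]).toNat + 1 := by omega
          rw [htn, List.set_cons_succ]
          exact congrArg (List.cons none) hrec
        · have hc : ¬ (0 ≤ pos ∧ pos < (((0 :: (noneIndicesFrom xs 0).map (· + 1)).length : Nat) : Int)) := by
            simp only [List.length_cons, List.length_map]
            push_cast
            omega
          have hc' : ¬ (0 ≤ pos - 1 ∧ pos - 1 < ((noneIndicesFrom xs 0).length : Int)) := by omega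
          rw [if_neg hc'] at hrec
          rw [if_neg hc, if_neg h0]
          exact congrArg (List.cons none) hrec
    | some v =>
      simp only [next_slice_key_alt, noneIndicesFrom_cons_some, rep]
      have hrec := ih pos
      simp only [next_slice_key_alt] at hrec
      by_cases hin : 0 ≤ pos ∧ pos < ((noneIndicesFrom xs 0).length : Int)
      · have hlt : pos.toNat < (noneIndicesFrom xs 0).length := by omega
        have hmem : (noneIndicesFrom xs 0)[pos.toNat] ∈ noneIndicesFrom xs 0 :=
          List.getElem_mem _
        have hnn := noneIndicesFrom_nonneg xs _ hmem
        have hc : 0 ≤ pos ∧ pos < ((((noneIndicesFrom xs 0).map (· + 1)).length : Nat) : Int) := by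
          simp; omega
        rw [if_pos hc]
        rw [if_pos hin, List.getD_eq_getElem _ _ (by omega)] at hrec
        have hgd : (((noneIndicesFrom xs 0).map (· + 1))).getD pos.toNat 0
            = (noneIndicesFrom xs 0)[pos.toNat] + 1 := by
          rw [List.getD_eq_getElem _ _ (by simpa using hlt)]
          simp
        rw [hgd]
        have htn : ((noneIndicesFrom xs 0)[pos.toNat] + 1).toNat
            = ((noneIndicesFrom xs 0)[pos.toNat]).toNat + 1 := by omega
        rw [htn, List.set_cons_succ]
        exact congrArg (List.cons (some v)) hrec
      · have hc : ¬ (0 ≤ pos ∧ pos < ((((noneIndicesFrom xs 0).map (· + 1)).length : Nat) : Int)) := by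
          simp only [List.length_map]; exact hin
        rw [if_neg hin] at hrec
        rw [if_neg hc]
        exact congrArg (List.cons (some v)) hrec

-- ===== VERDICT (by name: the statement is the Claim_ definition above) =====
theorem next_slice_key_spec : Claim_equal_next_slice_key := by
  intro osk pos kp _
  unfold Spec_next_slice_key next_slice_key
  rw [nskGo_eq_rep, alt_eq_rep]
  norm_num
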